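-- pv_equiv track=rewrite | github.com/nmahlangu/algorithms | v2/hellointerview/unique_paths.py | unique_paths_bottom_up
-- ===== SOURCE A (Python) =====
-- def unique_paths_bottom_up(m: int, n: int) -> int:
--     if not m or not n:
--         return 0
--
--     dp: list[list[int]] = [[0] * (n) for _ in range(m)]
--     for i in range(m):
--         dp[i][0] = 1
--     for i in range(n):
--         dp[0][i] = 1
--
--     for i in range(1, m):
--         for j in range(1, n):
--             dp[i][j] = dp[i][j - 1] + dp[i - 1][j]
--
--     return dp[m - 1][n - 1]
-- ===== SOURCE B (Python) =====
-- def unique_paths_bottom_up(m: int, n: int) -> int: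
--     if not m or not n:
--         return 0
--     r = min(m - 1, n - 1)
--     acc = 1
--     for k in range(1, r + 1):
--         acc = acc * (m + n - 2 - r + k) // k
--     return acc
-- ===== Notes on version B (the rewrite author's own statement) =====
-- stated objective: faster
-- what changed: Replaces the O(m*n) DP grid fill with the binomial coefficient C(m+n-2, min(m-1,n-1)) computed by an O(min(m,n)) multiply-then-exact-divide loop.
import Mathlib
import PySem

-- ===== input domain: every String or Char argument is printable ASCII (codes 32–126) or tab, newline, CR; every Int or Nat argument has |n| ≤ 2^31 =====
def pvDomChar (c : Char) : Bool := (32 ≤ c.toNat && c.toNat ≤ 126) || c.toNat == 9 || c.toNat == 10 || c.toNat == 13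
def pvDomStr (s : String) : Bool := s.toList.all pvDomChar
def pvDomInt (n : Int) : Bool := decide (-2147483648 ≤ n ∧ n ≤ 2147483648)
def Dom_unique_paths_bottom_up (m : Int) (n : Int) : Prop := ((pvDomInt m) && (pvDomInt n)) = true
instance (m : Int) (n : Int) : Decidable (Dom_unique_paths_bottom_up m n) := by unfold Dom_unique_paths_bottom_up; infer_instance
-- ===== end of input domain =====

-- B replaces A's O(m*n) DP grid fill with the binomial coefficient C(m+n-2, min(m-1,n-1))
-- computed by an O(min(m,n)) multiply-then-exact-divide loop.

-- ===== PORT A =====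
-- Python lists are arrays; dp is ported as Array (Array Int). dp[i][j] read / dp[i][j] = v write,
-- hand-ported: exact for the nonnegative in-range indices A uses on every input Pre_ admits
-- (Python never raises or wraps there).
def pvGet (d : Array (Array Int)) (i j : Int) : Int :=
  (d.getD i.toNat #[]).getD j.toNat 0
def pvSet (d : Array (Array Int)) (i j : Int) (v : Int) : Array (Array Int) :=
  d.modify i.toNat (fun row => row.setIfInBounds j.toNat v)

def unique_paths_bottom_up (m : Int) (n : Int) : Int :=
  if m == 0 || n == 0 then 0
  else
    -- dp = [[0] * n for _ in range(m)]
    let dp := ((PySem.List.pyRange 0 m 1).map (fun _ => (List.replicate n.toNat (0 : Int)).toArray)).toArray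
    -- for i in range(m): dp[i][0] = 1
    let dp := (PySem.List.pyRange 0 m 1).foldl (fun d i => pvSet d i 0 1) dp
    -- for i in range(n): dp[0][i] = 1
    let dp := (PySem.List.pyRange 0 n 1).foldl (fun d i => pvSet d 0 i 1) dp
    -- for i in range(1, m): for j in range(1, n): dp[i][j] = dp[i][j-1] + dp[i-1][j]
    let dp := (PySem.List.pyRange 1 m 1).foldl (fun d i =>
        (PySem.List.pyRange 1 n 1).foldl (fun d j =>
          pvSet d i j (pvGet d i (j - 1) + pvGet d (i - 1) j)) d) dp
    pvGet dp (m - 1) (n - 1)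

-- ===== PORT B =====
def unique_paths_bottom_up_alt (m : Int) (n : Int) : Int :=
  if m == 0 || n == 0 then 0
  else
    let r := min (m - 1) (n - 1)
    (PySem.List.pyRange 1 (r + 1) 1).foldl
      (fun acc k => PySem.Int.floordiv (acc * (m + n - 2 - r + k)) k) 1

-- ===== PRECONDITION & SPEC =====
-- Pre_ excludes exactly the inputs on which A raises IndexError: a negative dimension
-- together with the other dimension nonzero (the initialisation loops index an empty/short dp).
def Pre_unique_paths_bottom_up (m : Int) (n : Int) : Prop :=
  m = 0 ∨ n = 0 ∨ (1 ≤ m ∧ 1 ≤ n)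
instance (m : Int) (n : Int) : Decidable (Pre_unique_paths_bottom_up m n) := by
  unfold Pre_unique_paths_bottom_up; infer_instance

def pvWitness_unique_paths_bottom_up : Int × Int := (3, 4)

def Spec_unique_paths_bottom_up (m : Int) (n : Int) (out : Int) : Prop :=
  out = unique_paths_bottom_up_alt m n
instance (m : Int) (n : Int) (out : Int) : Decidable (Spec_unique_paths_bottom_up m n out) := by
  unfold Spec_unique_paths_bottom_up; infer_instance

-- ===== CLAIM (what is proved, stated in full; the proofs are below) =====
def Claim_equal_unique_paths_bottom_up : Prop :=
  ∀ (m : Int) (n : Int), Dom_unique_paths_bottom_up m n →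
    Pre_unique_paths_bottom_up m n →
    Spec_unique_paths_bottom_up m n (unique_paths_bottom_up m n)

-- ===== LEMMAS AND PROOFS =====

-- the row [1, 0, ..., 0] every row holds after the first init loop
def initRow (b : Nat) : List Int := 1 :: List.replicate (b - 1) 0
-- row i of Pascal's grid: entry j is C(i+j, j)
def pRow (i b : Nat) : List Int := (List.range b).map (fun j => ((i + j).choose j : Int))

lemma getD_map_range' {A : Type} (b k : Nat) (f : Nat → A) (d : A) :
    ((List.range b).map f).getD k d = if k < b then f k else d := by
  rcases lt_or_ge k b with h | h
  · rw [List.getD_eq_getElem _ _ (by simpa using h)]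
    simp [h]
  · rw [List.getD_eq_default _ _ (by simpa using h)]
    simp only [if_neg (Nat.not_lt.2 h)]

lemma set_map_range {A : Type} (b t : Nat) (f : Nat → A) (v : A) :
    ((List.range b).map f).set t v
      = (List.range b).map (fun j => if j = t then v else f j) := by
  apply List.ext_getElem
  · simp
  · intro i h1 h2
    simp only [List.getElem_set, List.getElem_map, List.getElem_range]
    split_ifs with h h' h'
    · rfl
    · exact absurd h.symm h'
    · exact absurd h'.symm h
    · rfl

-- for i over the index range of M: d[i] = f(d[i])  ⇒  map f
lemma foldl_rows (f : List Int → List Int) :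
    ∀ (M P : List (List Int)),
      (List.range' P.length M.length).foldl (fun d i => d.set i (f (d.getD i []))) (P ++ M)
        = P ++ M.map f := by
  intro M
  induction M with
  | nil => intro P; simp
  | cons x M ih =>
    intro P
    rw [List.length_cons, List.range'_succ, List.foldl_cons]
    have hget : (P ++ x :: M).getD P.length [] = x := by
      rw [List.getD_eq_getElem _ _ (by simp)]
      simp
    have hset : (P ++ x :: M).set P.length (f x) = (P ++ [f x]) ++ M := by
      rw [List.set_append_right _ _ (le_refl _)]
      simp
    rw [hget, hset]
    have hlen : P.length + 1 = (P ++ [f x]).length := by simp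
    rw [hlen, ih (P ++ [f x])]
    simp

-- a loop that only rewrites row 0 leaves the tail alone
lemma foldl_row0 {A : Type} (g : List Int → A → List Int) :
    ∀ (l : List A) (R : List Int) (T : List (List Int)),
      l.foldl (fun d i => d.set 0 (g (d.getD 0 []) i)) (R :: T) = (l.foldl g R) :: T := by
  intro l
  induction l with
  | nil => intro R T; rfl
  | cons x l ih =>
    intro R T
    rw [List.foldl_cons, List.getD_cons_zero, List.set_cons_zero]
    exact ih _ _

-- for i over the index range of R: r[i] = 1  ⇒  replicate 1
lemma setOnes : ∀ (R P : List Int),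
    (List.range' P.length R.length).foldl (fun r i => r.set i (1 : Int)) (P ++ R)
      = P ++ List.replicate R.length 1 := by
  intro R
  induction R with
  | nil => intro P; simp
  | cons x R ih =>
    intro P
    rw [List.length_cons, List.range'_succ, List.foldl_cons]
    have hset : (P ++ x :: R).set P.length 1 = (P ++ [(1 : Int)]) ++ R := by
      rw [List.set_append_right _ _ (le_refl _)]
      simp
    rw [hset]
    have hlen : P.length + 1 = (P ++ [(1 : Int)]).length := by simp
    rw [hlen, ih (P ++ [(1 : Int)])]
    simp [List.replicate_succ]

-- the inner j-loop only rewrites row i, reading the frozen row p ≠ i: matrix fold = row fold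
lemma foldl_innerRow (i p : Nat) (hip : p ≠ i) :
    ∀ (ks : List Nat) (d : List (List Int)), i < d.length →
      ks.foldl (fun d k => d.set i
          ((d.getD i []).set (1 + k)
            ((d.getD i []).getD k 0 + (d.getD p []).getD (1 + k) 0))) d
        = d.set i (ks.foldl
            (fun r k => r.set (1 + k) (r.getD k 0 + (d.getD p []).getD (1 + k) 0))
            (d.getD i [])) := by
  intro ks
  induction ks with
  | nil =>
    intro d hd
    rw [List.foldl_nil, List.foldl_nil, List.getD_eq_getElem _ _ hd, List.set_getElem_self]
  | cons k ks ih =>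
    intro d hd
    rw [List.foldl_cons, List.foldl_cons]
    set r1 := (d.getD i []).set (1 + k)
      ((d.getD i []).getD k 0 + (d.getD p []).getD (1 + k) 0) with hr1
    have hlen : i < (d.set i r1).length := by simpa using hd
    rw [ih (d.set i r1) hlen]
    have h1 : (d.set i r1).getD i [] = r1 := by
      rw [List.getD_eq_getElem _ _ hlen]
      simp
    have h2 : (d.set i r1).getD p [] = d.getD p [] := by
      rcases lt_or_ge p d.length with h | h
      · rw [List.getD_eq_getElem _ _ (by simpa using h), List.getD_eq_getElem _ _ h]
        simp only [List.getElem_set]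
        rw [if_neg (by omega)]
      · rw [List.getD_eq_default _ _ (by simpa using h), List.getD_eq_default _ _ h]
    rw [h1, h2, List.set_set]

-- the inner loop builds Pascal row i+1 from Pascal row i, left to right
lemma rowFold (i b : Nat) (hb : 1 ≤ b) :
    ∀ t, t ≤ b - 1 →
      (List.range t).foldl
          (fun r k => r.set (1 + k) (r.getD k 0 + (pRow i b).getD (1 + k) 0)) (initRow b)
        = (List.range b).map (fun j => if j ≤ t then (((i + 1) + j).choose j : Int) else 0) := by
  intro t
  induction t with
  | zero =>
    intro _
    apply List.ext_getElem
    · simp [initRow]; omega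
    · intro k h1 h2
      simp only [List.getElem_map, List.getElem_range]
      match k with
      | 0 => simp [initRow]
      | k + 1 =>
        have hk : ¬ (k + 1 ≤ 0) := by omega
        simp only [initRow, hk, if_neg, List.getElem_cons_succ]
        have : k < b - 1 := by simp [initRow] at h1; omega
        simp [List.getElem_replicate]
  | succ t ih =>
    intro ht
    have ht' : t ≤ b - 1 := by omega
    have htb : 1 + t < b := by omega
    have htlt : t < b := by omega
    rw [List.range_succ, List.foldl_append, ih ht', List.foldl_cons, List.foldl_nil]
    rw [getD_map_range' b t]
    have h2 : (pRow i b).getD (1 + t) 0 = ((i + (1 + t)).choose (1 + t) : Int) := by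
      rw [pRow, getD_map_range' b (1 + t)]
      simp [htb]
    rw [h2]
    simp only [htlt, if_pos, le_refl]
    rw [set_map_range]
    apply List.map_congr_left
    intro j hj
    by_cases hje : j = 1 + t
    · subst hje
      have hle : 1 + t ≤ t + 1 := by omega
      simp only [if_pos rfl, hle, if_pos]
      have hp : ((i + 1) + (1 + t)).choose (1 + t)
          = ((i + 1) + t).choose t + (i + (1 + t)).choose (1 + t) := by
        have e1 : (i + 1) + (1 + t) = (i + t + 1) + 1 := by omega
        have e2 : 1 + t = t + 1 := by omega
        rw [e1, e2, Nat.choose_succ_succ, Nat.succ_eq_add_one]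
        have e3 : i + (t + 1) = i + t + 1 := by omega
        have e4 : i + t + 1 = i + 1 + t := by omega
        rw [e3, e4]
      rw [hp]
      push_cast
      ring
    · have : j ≤ t + 1 ↔ j ≤ t := by omega
      simp [hje, this]

-- the outer i-loop fills Pascal rows 1..t
lemma outerFold (a b : Nat) (hb : 1 ≤ b) :
    ∀ t, t < a →
      (List.range t).foldl
          (fun d k => (List.range (b - 1)).foldl
            (fun d k' => d.set (1 + k)
              ((d.getD (1 + k) []).set (1 + k')
                ((d.getD (1 + k) []).getD k' 0 + (d.getD k []).getD (1 + k') 0))) d)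
          ((List.range a).map (fun i => if i = 0 then pRow 0 b else initRow b))
        = (List.range a).map (fun i => if i ≤ t then pRow i b else initRow b) := by
  intro t
  induction t with
  | zero =>
    intro _
    simp only [List.range_zero, List.foldl_nil]
    apply List.map_congr_left
    intro i _
    by_cases h : i = 0
    · simp [h]
    · have : ¬ (i ≤ 0) := by omega
      simp [h, this]
  | succ t ih =>
    intro ht
    have ht' : t < a := by omega
    have hta : 1 + t < a := by omega
    rw [List.range_succ, List.foldl_append, ih ht', List.foldl_cons, List.foldl_nil]
    rw [foldl_innerRow (1 + t) t (by omega) _ _ (by simp; omega)]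
    have hgi : ((List.range a).map (fun i => if i ≤ t then pRow i b else initRow b)).getD (1 + t) []
        = initRow b := by
      rw [getD_map_range' a (1 + t)]
      have : ¬ (1 + t ≤ t) := by omega
      simp [hta, this]
    have hgp : ((List.range a).map (fun i => if i ≤ t then pRow i b else initRow b)).getD t []
        = pRow t b := by
      rw [getD_map_range' a t]
      simp [ht']
    rw [hgi, hgp, rowFold t b hb (b - 1) (le_refl _)]
    have hrow : (List.range b).map (fun j => if j ≤ b - 1 then ((t + 1 + j).choose j : Int) else 0)
        = pRow (t + 1) b := by
      apply List.map_congr_left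
      intro j hj
      simp only [List.mem_range] at hj
      have : j ≤ b - 1 := by omega
      simp [this, pRow]
    rw [hrow, set_map_range]
    apply List.map_congr_left
    intro i hi
    by_cases hie : i = 1 + t
    · subst hie
      have h1 : 1 + t ≤ t + 1 := by omega
      have h2 : t + 1 = 1 + t := by omega
      simp [h1, ← h2]
    · have : i ≤ t + 1 ↔ i ≤ t := by omega
      simp [hie, this]

-- cast-normalisation helpers used to turn the Int-indexed folds into Nat-indexed folds
lemma cast_one_add (k : Nat) : (1 : Int) + (k : Int) = ((1 + k : Nat) : Int) := by push_cast; ring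
lemma cast_one_add_sub (k : Nat) : ((1 + k : Nat) : Int) - 1 = (k : Int) := by push_cast; ring

lemma replicate_zero_eq (b : Nat) (hb : 1 ≤ b) :
    List.replicate b (0 : Int) = 0 :: List.replicate (b - 1) 0 := by
  cases b with
  | zero => omega
  | succ b' => simp [List.replicate_succ]

lemma replicate_cons_eq (a : Nat) (ha : 1 ≤ a) (R : List Int) :
    List.replicate a R = R :: List.replicate (a - 1) R := by
  cases a with
  | zero => omega
  | succ a' => simp [List.replicate_succ]

lemma pRow_zero (b : Nat) : pRow 0 b = List.replicate b 1 := by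
  apply List.ext_getElem
  · simp [pRow]
  · intro k h1 h2
    simp [pRow, Nat.choose_self]

lemma mat0_eq (a b : Nat) (ha : 1 ≤ a) :
    (List.range a).map (fun i => if i = 0 then pRow 0 b else initRow b)
      = pRow 0 b :: List.replicate (a - 1) (initRow b) := by
  apply List.ext_getElem
  · simp; omega
  · intro k h1 h2
    simp only [List.getElem_map, List.getElem_range]
    match k with
    | 0 => simp
    | k + 1 =>
      have hk : k + 1 ≠ 0 := by omega
      have hkl : k < a - 1 := by simp at h1; omega
      simp [hk, List.getElem_replicate]

-- A computes the binomial C((a-1)+(b-1), b-1)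
-- proof-side model of the Array grid as a list of lists
def toMat (d : List (List Int)) : Array (Array Int) := (d.map List.toArray).toArray

lemma toArr_getD (l : List Int) (i : Nat) (d : Int) : l.toArray.getD i d = l.getD i d := by
  rcases lt_or_ge i l.length with h | h
  · rw [Array.getD, dif_pos (by simpa using h), List.getD_eq_getElem _ _ h]
    simp
  · rw [Array.getD, dif_neg (by simpa using h), List.getD_eq_default _ _ h]

lemma toMat_getD (dd : List (List Int)) (i : Nat) :
    (toMat dd).getD i #[] = (dd.getD i []).toArray := by
  rw [toMat]
  rcases lt_or_ge i dd.length with h | h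
  · rw [Array.getD, dif_pos (by simpa using h), List.getD_eq_getElem _ _ h]
    simp
  · rw [Array.getD, dif_neg (by simpa using h), List.getD_eq_default _ _ h]

lemma toArr_set (l : List Int) (i : Nat) (v : Int) :
    l.toArray.setIfInBounds i v = (l.set i v).toArray := by
  simp

lemma map_modify_toArray (dd : List (List Int)) (j : Nat) (v : Int) :
    ∀ (i : Nat), (dd.map List.toArray).modify i (fun row => row.setIfInBounds j v)
      = (dd.modify i (fun r => r.set j v)).map List.toArray := by
  induction dd with
  | nil => intro i; simp
  | cons x l ih =>
    intro i
    cases i with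
    | zero => simp [toArr_set]
    | succ i => simp [ih]

lemma modify_eq_set_getD (dd : List (List Int)) (i : Nat) (j : Nat) (v : Int) :
    dd.modify i (fun r => r.set j v) = dd.set i ((dd.getD i []).set j v) := by
  apply List.ext_getElem
  · simp
  · intro k h1 h2
    rw [List.getElem_modify, List.getElem_set]
    by_cases hk : k = i
    · subst hk
      have hkl : k < dd.length := by simpa using h2
      simp [List.getElem?_eq_getElem hkl]
    · simp [hk, Ne.symm hk]

lemma pvGetA_nat (dd : List (List Int)) (i j : Nat) :
    pvGet (toMat dd) (i : Int) (j : Int) = (dd.getD i []).getD j 0 := by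
  have hi : ((i : Int)).toNat = i := by omega
  have hj : ((j : Int)).toNat = j := by omega
  rw [pvGet, hi, hj, toMat_getD, toArr_getD]

lemma pvSetA_nat (dd : List (List Int)) (i j : Nat) (v : Int) :
    pvSet (toMat dd) (i : Int) (j : Int) v
      = toMat (dd.set i ((dd.getD i []).set j v)) := by
  have hi : ((i : Int)).toNat = i := by omega
  have hj : ((j : Int)).toNat = j := by omega
  rw [pvSet, hi, hj, toMat]
  simp only [List.modify_toArray]
  rw [map_modify_toArray, modify_eq_set_getD, ← toMat]

lemma pvSetA_nat0 (dd : List (List Int)) (i : Nat) (v : Int) :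
    pvSet (toMat dd) (i : Int) 0 v = toMat (dd.set i ((dd.getD i []).set 0 v)) := by
  have h := pvSetA_nat dd i 0 v
  simpa using h

lemma pvSetA_nat0' (dd : List (List Int)) (j : Nat) (v : Int) :
    pvSet (toMat dd) 0 (j : Int) v = toMat (dd.set 0 ((dd.getD 0 []).set j v)) := by
  have h := pvSetA_nat dd 0 j v
  simpa using h

-- a fold on lifted state equals the lifted fold
lemma foldl_lift {A B C : Type} (h : B → C) (f : B → A → B) (f' : C → A → C)
    (hc : ∀ (x : B) (y : A), f' (h x) y = h (f x y)) :
    ∀ (l : List A) (init : B), l.foldl f' (h init) = h (l.foldl f init) := by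
  intro l
  induction l with
  | nil => intro init; rfl
  | cons x l ih =>
    intro init
    rw [List.foldl_cons, List.foldl_cons, hc, ih]

lemma stage1L (a b : Nat) (hb : 1 ≤ b) :
    (List.range a).foldl (fun d k => d.set k ((d.getD k []).set 0 1))
        (List.replicate a (List.replicate b 0))
      = List.replicate a (initRow b) := by
  have h := foldl_rows (fun r => r.set 0 1) (List.replicate a (List.replicate b 0)) []
  simp only [List.nil_append, List.length_nil, List.length_replicate] at h
  rw [← List.range_eq_range'] at h
  rw [h, List.map_replicate, replicate_zero_eq b hb, List.set_cons_zero]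
  rfl

lemma stage2L (a b : Nat) (ha : 1 ≤ a) (hb : 1 ≤ b) :
    (List.range b).foldl (fun d k => d.set 0 ((d.getD 0 []).set k 1))
        (List.replicate a (initRow b))
      = (List.range a).map (fun i => if i = 0 then pRow 0 b else initRow b) := by
  rw [replicate_cons_eq a ha, foldl_row0 (fun r (i : Nat) => r.set i 1)]
  have hlen : (initRow b).length = b := by simp [initRow]; omega
  have h := setOnes (initRow b) []
  simp only [List.nil_append, List.length_nil] at h
  rw [← List.range_eq_range', hlen] at h
  rw [h, ← pRow_zero, mat0_eq a b ha]

lemma aFormula (a b : Nat) (ha : 1 ≤ a) (hb : 1 ≤ b) :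
    unique_paths_bottom_up (a : Int) (b : Int) = (((a - 1) + (b - 1)).choose (b - 1) : Int) := by
  have hg : ((a : Int) == 0 || (b : Int) == 0) = false := by simp; omega
  have hta : ((a : Int) - 0).toNat = a := by omega
  have htb : ((b : Int) - 0).toNat = b := by omega
  have hta1 : ((a : Int) - 1).toNat = a - 1 := by omega
  have htb1 : ((b : Int) - 1).toNat = b - 1 := by omega
  have htbn : (b : Int).toNat = b := by omega
  simp only [unique_paths_bottom_up, hg, Bool.false_eq_true, if_false]
  -- stage 0: the comprehension builds the zero matrix
  have h0 : ((PySem.List.pyRange 0 (a : Int) 1).map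
        (fun _ => (List.replicate (b : Int).toNat (0 : Int)).toArray)).toArray
      = toMat (List.replicate a (List.replicate b 0)) := by
    rw [PySem.List.pyRange_one, hta, htbn, List.map_map, toMat, List.map_replicate]
    have hconst : ∀ (l : List Nat),
        l.map ((fun _ => (List.replicate b (0:Int)).toArray) ∘ (fun k : Nat => (0:Int) + ↑k))
          = List.replicate l.length ((List.replicate b 0).toArray) := by
      intro l
      induction l with
      | nil => simp
      | cons x l ih =>
        simp only [List.map_cons, List.length_cons, List.replicate_succ]
        rw [ih]
        rfl
    rw [hconst, List.length_range]
  rw [h0]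
  -- stage 1: first column set to 1
  have h1 : (PySem.List.pyRange 0 (a : Int) 1).foldl (fun d i => pvSet d i 0 1)
        (toMat (List.replicate a (List.replicate b 0)))
      = toMat (List.replicate a (initRow b)) := by
    rw [PySem.List.pyRange_one, hta, List.foldl_map]
    simp only [zero_add]
    rw [foldl_lift toMat (fun d k => d.set k ((d.getD k []).set 0 1))
        (fun d (k : Nat) => pvSet d (k : Int) 0 1) (fun dd k => pvSetA_nat0 dd k 1)]
    rw [stage1L a b hb]
  rw [h1]
  -- stage 2: first row set to 1
  have h2 : (PySem.List.pyRange 0 (b : Int) 1).foldl (fun d i => pvSet d 0 i 1)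
        (toMat (List.replicate a (initRow b)))
      = toMat ((List.range a).map (fun i => if i = 0 then pRow 0 b else initRow b)) := by
    rw [PySem.List.pyRange_one, htb, List.foldl_map]
    simp only [zero_add]
    rw [foldl_lift toMat (fun d k => d.set 0 ((d.getD 0 []).set k 1))
        (fun d (k : Nat) => pvSet d 0 (k : Int) 1) (fun dd k => pvSetA_nat0' dd k 1)]
    rw [stage2L a b ha hb]
  rw [h2]
  -- stage 3: the DP recurrence fills Pascal rows
  have hcInner : ∀ (k : Nat) (dd' : List (List Int)) (k' : Nat),
      pvSet (toMat dd') ((1 + k : Nat) : Int) ((1 + k' : Nat) : Int)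
          (pvGet (toMat dd') ((1 + k : Nat) : Int) (k' : Int)
            + pvGet (toMat dd') (k : Int) ((1 + k' : Nat) : Int))
        = toMat (dd'.set (1 + k)
            ((dd'.getD (1 + k) []).set (1 + k')
              ((dd'.getD (1 + k) []).getD k' 0 + (dd'.getD k []).getD (1 + k') 0))) := by
    intro k dd' k'
    rw [pvGetA_nat, pvGetA_nat, pvSetA_nat]
  have hcOuter : ∀ (dd : List (List Int)) (k : Nat),
      (List.range (b - 1)).foldl
          (fun d (k' : Nat) => pvSet d ((1 + k : Nat) : Int) ((1 + k' : Nat) : Int)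
            (pvGet d ((1 + k : Nat) : Int) (k' : Int) + pvGet d (k : Int) ((1 + k' : Nat) : Int)))
          (toMat dd)
        = toMat ((List.range (b - 1)).foldl
            (fun d k' => d.set (1 + k)
              ((d.getD (1 + k) []).set (1 + k')
                ((d.getD (1 + k) []).getD k' 0 + (d.getD k []).getD (1 + k') 0))) dd) := by
    intro dd k
    exact foldl_lift toMat _ _ (hcInner k) _ dd
  have h3 : (PySem.List.pyRange 1 (a : Int) 1).foldl (fun d i =>
        (PySem.List.pyRange 1 (b : Int) 1).foldl (fun d j =>
          pvSet d i j (pvGet d i (j - 1) + pvGet d (i - 1) j)) d)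
        (toMat ((List.range a).map (fun i => if i = 0 then pRow 0 b else initRow b)))
      = toMat ((List.range a).map (fun i => if i ≤ a - 1 then pRow i b else initRow b)) := by
    simp only [PySem.List.pyRange_one, hta1, htb1, List.foldl_map, cast_one_add,
      cast_one_add_sub]
    rw [foldl_lift toMat
        (fun d k => (List.range (b - 1)).foldl
          (fun d k' => d.set (1 + k)
            ((d.getD (1 + k) []).set (1 + k')
              ((d.getD (1 + k) []).getD k' 0 + (d.getD k []).getD (1 + k') 0))) d)
        (fun d (k : Nat) => (List.range (b - 1)).foldl
          (fun d (k' : Nat) => pvSet d ((1 + k : Nat) : Int) ((1 + k' : Nat) : Int)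
            (pvGet d ((1 + k : Nat) : Int) (k' : Int) + pvGet d (k : Int) ((1 + k' : Nat) : Int))) d)
        (fun dd k => hcOuter dd k)]
    rw [outerFold a b hb (a - 1) (by omega)]
  rw [h3]
  have e1 : (a : Int) - 1 = ((a - 1 : Nat) : Int) := by omega
  have e2 : (b : Int) - 1 = ((b - 1 : Nat) : Int) := by omega
  rw [e1, e2, pvGetA_nat, getD_map_range' a (a - 1)]
  have hlt : a - 1 < a := by omega
  simp only [hlt, if_pos, le_refl]
  rw [pRow, getD_map_range' b (b - 1)]
  have hlt2 : b - 1 < b := by omega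
  simp [hlt2]

-- B's multiplicative loop computes rising products with exact division: C(q+t, t)
lemma bFold (q : Nat) : ∀ (t : Nat),
    (List.range t).foldl
        (fun acc k => PySem.Int.floordiv (acc * ((q : Int) + ((1 + k : Nat) : Int))) ((1 + k : Nat) : Int)) 1
      = ((q + t).choose t : Int) := by
  intro t
  induction t with
  | zero => simp
  | succ t ih =>
    rw [List.range_succ, List.foldl_append, ih, List.foldl_cons, List.foldl_nil]
    have h1 : (q : Int) + ((1 + t : Nat) : Int) = ((q + t + 1 : Nat) : Int) := by push_cast; ring
    rw [h1]
    rw [show ((q + t).choose t : Int) * ((q + t + 1 : Nat) : Int)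
        = (((q + t).choose t * (q + t + 1) : Nat) : Int) by push_cast; ring]
    rw [show ((1 + t : Nat) : Int) = ((t + 1 : Nat) : Int) by push_cast; ring]
    rw [PySem.Int.floordiv_natCast]
    have hm : (q + t).choose t * (q + t + 1) = (q + t + 1).choose (t + 1) * (t + 1) := by
      have h := Nat.succ_mul_choose_eq (q + t) t
      simpa [Nat.succ_eq_add_one, Nat.mul_comm] using h
    rw [hm, Nat.mul_div_cancel _ (by omega), ← Nat.add_assoc]

-- B computes the same binomial
-- B computes the same binomial
lemma bFormula (a b : Nat) (ha : 1 ≤ a) (hb : 1 ≤ b) :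
    unique_paths_bottom_up_alt (a : Int) (b : Int) = (((a - 1) + (b - 1)).choose (b - 1) : Int) := by
  have hg : ((a : Int) == 0 || (b : Int) == 0) = false := by simp; omega
  simp only [unique_paths_bottom_up_alt, hg, Bool.false_eq_true, if_false]
  have hr : min ((a : Int) - 1) ((b : Int) - 1) = ((min (a - 1) (b - 1) : Nat) : Int) := by
    have e1 : (a : Int) - 1 = ((a - 1 : Nat) : Int) := by omega
    have e2 : (b : Int) - 1 = ((b - 1 : Nat) : Int) := by omega
    rw [e1, e2, Nat.cast_min]
  rw [hr]
  set rn := min (a - 1) (b - 1) with hrn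
  set q := (a - 1) + (b - 1) - rn with hq
  have hrle : rn ≤ (a - 1) + (b - 1) := by omega
  have hqc : (a : Int) + (b : Int) - 2 - ((rn : Nat) : Int) = ((q : Nat) : Int) := by omega
  rw [PySem.List.pyRange_one]
  have ht : (((rn : Nat) : Int) + 1 - 1).toNat = rn := by omega
  rw [ht, List.foldl_map]
  simp only [hqc, cast_one_add]
  rw [bFold q rn]
  congr 1
  have hs : q + rn = (a - 1) + (b - 1) := by omega
  rw [hs]
  rcases Nat.le_total (b - 1) (a - 1) with h | h
  · have : rn = b - 1 := by omega
    rw [this]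
  · have hrn' : rn = a - 1 := by omega
    have hsym := Nat.choose_symm (show b - 1 ≤ (a - 1) + (b - 1) by omega)
    have e : (a - 1) + (b - 1) - (b - 1) = a - 1 := by omega
    rw [e] at hsym
    rw [hrn']
    exact hsym

-- ===== VERDICT (by name: the statement is the Claim_ definition above) =====
theorem unique_paths_bottom_up_spec : Claim_equal_unique_paths_bottom_up := by
  intro m n _ hpre
  unfold Spec_unique_paths_bottom_up
  rcases hpre with h | h | ⟨hm, hn⟩
  · subst h; simp [unique_paths_bottom_up, unique_paths_bottom_up_alt]
  · subst h; simp [unique_paths_bottom_up, unique_paths_bottom_up_alt]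
  · obtain ⟨a, rfl⟩ : ∃ a : Nat, m = (a : Int) := ⟨m.toNat, (Int.toNat_of_nonneg (by omega)).symm⟩
    obtain ⟨b, rfl⟩ : ∃ b : Nat, n = (b : Int) := ⟨n.toNat, (Int.toNat_of_nonneg (by omega)).symm⟩
    rw [aFormula a b (by exact_mod_cast hm) (by exact_mod_cast hn),
        bFormula a b (by exact_mod_cast hm) (by exact_mod_cast hn)]
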